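-- pv_equiv track=rewrite | github.com/slysherz/advent-of-code-2023 | day7.py | countRepeatsJ
-- ===== SOURCE A (Python) =====
-- def countRepeatsJ(cards):
--     count = {}
--
--     for c in cards:
--         if not c in count: count[c] = 0
--         count[c] += 1
--
--     js = count['J'] if 'J' in count else 0
--     if 'J' in count: del count['J']
--
--     return (list(sorted(count.values(), reverse=True)), js)
-- ===== SOURCE B (Python) =====
-- def _runs(xs):
--     # run lengths of consecutive equal elements, front to back
--     if not xs:
--         return []
--     c = xs[0]
--     k = 1
--     while k < len(xs) and xs[k] == c:
--         k += 1
--     return [k] + _runs(xs[k:])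
--
--
-- def countRepeatsJ(cards):
--     rest = sorted(c for c in cards if c != 'J')
--     counts = sorted(_runs(rest), reverse=True)
--     return (counts, len(cards) - len(rest))
-- ===== Notes on version B (the rewrite author's own statement) =====
-- stated objective: alternative
-- what changed: Replaces the dict tally (insert-0-then-increment per card, delete 'J', sort the values) with a sort-then-group pass: drop the jokers, sort the remaining cards, take consecutive run lengths recursively, and derive the joker count as len(cards)-len(rest).
import Mathlib
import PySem

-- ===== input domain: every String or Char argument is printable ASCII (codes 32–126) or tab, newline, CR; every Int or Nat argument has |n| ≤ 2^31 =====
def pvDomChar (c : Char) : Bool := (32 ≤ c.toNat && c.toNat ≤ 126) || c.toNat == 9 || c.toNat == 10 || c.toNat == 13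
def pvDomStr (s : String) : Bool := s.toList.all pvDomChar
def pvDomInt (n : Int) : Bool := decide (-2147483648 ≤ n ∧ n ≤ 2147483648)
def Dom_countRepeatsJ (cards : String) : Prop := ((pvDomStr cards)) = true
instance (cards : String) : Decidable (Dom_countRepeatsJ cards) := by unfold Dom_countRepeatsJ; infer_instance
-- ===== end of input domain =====

-- B replaces A's dict tally with a sort-then-group pass (alternative decomposition, not faster).

-- ===== PORT A =====
def countRepeatsJ (cards : String) : List Int × Int :=
  let count := cards.toList.foldl (fun d c =>
      let d' := if d.contains c then d else d.insert c (0 : Int)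
      d'.insert c (d'.getD c 0 + 1)) PySem.Dict.empty
  let js := if count.contains 'J' then count.getD 'J' 0 else 0
  let count' := if count.contains 'J' then count.erase 'J' else count
  (PySem.List.sorted count'.values (fun x => x) true, js)

-- ===== PORT B =====
-- helper _runs: the inner while loop scans the equal leading elements, so
-- k = 1 + length of takeWhile (== c) on the tail, and xs[k:] is the corresponding dropWhile (exact).
def pvRuns (xs : List Char) : List Int :=
  match xs with
  | [] => []
  | c :: t =>
    (((t.takeWhile (fun x => x == c)).length + 1 : Nat) : Int) ::
      pvRuns (t.dropWhile (fun x => x == c))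
termination_by xs.length
decreasing_by
  simp only [List.length_cons]
  exact Nat.lt_succ_of_le (List.length_dropWhile_le _ _)

def countRepeatsJ_alt (cards : String) : List Int × Int :=
  let rest := PySem.List.sorted (cards.toList.filter (fun c => !(c == 'J'))) (fun c => c) false
  (PySem.List.sorted (pvRuns rest) (fun x => x) true,
   (cards.toList.length : Int) - (rest.length : Int))

-- ===== PRECONDITION & SPEC =====
def Spec_countRepeatsJ (cards : String) (out : List Int × Int) : Prop := out = countRepeatsJ_alt cards
instance (cards : String) (out : List Int × Int) : Decidable (Spec_countRepeatsJ cards out) := by unfold Spec_countRepeatsJ; infer_instance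

-- ===== CLAIM (what is proved, stated in full; the proofs are below) =====
def Claim_equal_countRepeatsJ : Prop := ∀ (cards : String), Dom_countRepeatsJ cards → Spec_countRepeatsJ cards (countRepeatsJ cards)

-- ===== LEMMAS AND PROOFS =====

-- A's per-card update (insert 0 if absent, then overwrite with old+1) is the Counter update.
lemma pvStepA (d : PySem.Dict Char Int) (c : Char) :
    (let d' := if d.contains c then d else d.insert c (0 : Int)
     d'.insert c (d'.getD c 0 + 1)) = d.insert c (d.getD c 0 + 1) := by
  by_cases h : d.contains c = true
  · simp [h]
  · simp only [Bool.not_eq_true] at h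
    simp only [h, Bool.false_eq_true, if_false]
    have hg : d.getD c 0 = 0 := by
      simp [PySem.Dict.getD, (PySem.Dict.get?_eq_none_iff_contains d c).mpr h]
    rw [PySem.Dict.getD_insert_self, hg]
    have hall : ∀ p ∈ d.items, (p.1 == c) = false := by
      intro p hp
      by_contra hb
      simp only [Bool.not_eq_false] at hb
      have : d.contains c = true := by
        simp only [PySem.Dict.contains, List.any_eq_true]
        exact ⟨p, hp, hb⟩
      simp [this] at h
    apply PySem.Dict.ext
    rw [PySem.Dict.items_insert_of_contains _ _ (by
          simp [PySem.Dict.contains, PySem.Dict.items_insert_of_not_contains _ _ h]),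
        PySem.Dict.items_insert_of_not_contains _ _ h,
        PySem.Dict.items_insert_of_not_contains _ _ h,
        List.map_append]
    congr 1
    · exact (List.map_congr_left (fun p hp => by simp [hall p hp])).trans (List.map_id _)
    · simp

-- Set.add commutes with filter
lemma pvAddFilter (p : Char → Bool) (s : List Char) (x : Char) :
    (PySem.Set.add s x).filter p = if p x then PySem.Set.add (s.filter p) x else s.filter p := by
  by_cases hm : x ∈ s <;> by_cases hp : p x = true <;>
    simp [PySem.Set.add, PySem.Set.contains, hm, hp, List.filter_append, List.mem_filter]

lemma pvFoldlAddFilter (p : Char → Bool) : ∀ (xs : List Char) (s : List Char),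
    (List.foldl PySem.Set.add s xs).filter p = List.foldl PySem.Set.add (s.filter p) (xs.filter p) := by
  intro xs
  induction xs with
  | nil => intro s; rfl
  | cons x t ih =>
    intro s
    simp only [List.foldl_cons, List.filter_cons]
    by_cases hp : p x = true
    · simp only [if_true, List.foldl_cons, ih (PySem.Set.add s x), pvAddFilter, hp]
    · simp only [Bool.not_eq_true] at hp
      simp only [Bool.false_eq_true, if_false, ih (PySem.Set.add s x), pvAddFilter, hp]

-- pushing a filter through set(...)
lemma pvOfListFilter (p : Char → Bool) (xs : List Char) :
    (PySem.Set.ofList xs).filter p = PySem.Set.ofList (xs.filter p) := by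
  simpa [PySem.Set.ofList, PySem.Set.empty] using pvFoldlAddFilter p xs []

-- adding elements already present changes nothing
lemma pvFoldlAddMem : ∀ (ys s : List Char), (∀ x ∈ ys, x ∈ s) → List.foldl PySem.Set.add s ys = s := by
  intro ys
  induction ys with
  | nil => intro s _; rfl
  | cons y t ih =>
    intro s h
    have : PySem.Set.add s y = s := by
      simp [PySem.Set.add, PySem.Set.contains, h y (by simp)]
    simp only [List.foldl_cons, this]
    exact ih s (fun x hx => h x (by simp [hx]))

-- an already-collected head stays in front while absent elements are folded in
lemma pvFoldlAddCons (a : Char) : ∀ (ys s : List Char), a ∉ ys → List.foldl PySem.Set.add (a :: s) ys = a :: List.foldl PySem.Set.add s ys := by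
  intro ys
  induction ys with
  | nil => intro s _; rfl
  | cons y t ih =>
    intro s h
    have hne : y ≠ a := fun he => h (by simp [he])
    have : PySem.Set.add (a :: s) y = a :: PySem.Set.add s y := by
      simp only [PySem.Set.add, PySem.Set.contains, List.contains_eq_mem, List.mem_cons]
      by_cases hm : y ∈ s
      · simp [hm]
      · simp [hm, hne]
    simp only [List.foldl_cons, this]
    exact ih _ (fun he => h (by simp [he]))

-- run lengths of a weakly increasing list are, up to permutation, the per-distinct-element counts
lemma pvRunsPerm : ∀ (l : List Char), l.Pairwise (· ≤ ·) →
    (pvRuns l).Perm ((PySem.Set.ofList l).map (fun k => (l.count k : Int))) := by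
  intro l
  induction l using pvRuns.induct with
  | case1 => intro _; simp [pvRuns, PySem.Set.ofList, PySem.Set.empty]
  | case2 c t ih =>
    intro hp
    have hpt : t.Pairwise (· ≤ ·) := hp.of_cons
    have hct : ∀ x ∈ t, c ≤ x := fun x hx => List.rel_of_pairwise_cons hp hx
    set tw := t.takeWhile (fun x => x == c) with htw
    set dw := t.dropWhile (fun x => x == c) with hdw
    have hsplit : tw ++ dw = t := List.takeWhile_append_dropWhile
    have htwc : ∀ x ∈ tw, x = c := by
      intro x hx
      have := List.mem_takeWhile_imp hx
      exact eq_of_beq this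
    have hdwp : dw.Pairwise (· ≤ ·) := List.Pairwise.sublist (List.dropWhile_sublist _) hpt
    have hcdw : c ∉ dw := by
      intro hc
      cases hdwe : dw with
      | nil => rw [hdwe] at hc; simp at hc
      | cons d r =>
        have hd : (d == c) = false := by
          have h3 := List.head?_dropWhile_not (fun x => x == c) t
          rw [← hdw, hdwe] at h3
          simpa using h3
        have hdc : d ≠ c := by simpa using hd
        rw [hdwe] at hc
        rcases List.mem_cons.mp hc with h | h
        · exact hdc h.symm
        · have h1 : d ≤ c := List.rel_of_pairwise_cons (hdwe ▸ hdwp) h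
          have h2 : c ≤ d := hct d (by
            rw [← hsplit, hdwe]; simp)
          exact hdc (le_antisymm h1 h2)
    have hofl : PySem.Set.ofList (c :: t) = c :: PySem.Set.ofList dw := by
      show List.foldl PySem.Set.add (PySem.Set.add PySem.Set.empty c) t = _
      have h0 : PySem.Set.add PySem.Set.empty c = [c] := rfl
      rw [h0, ← hsplit, List.foldl_append]
      rw [pvFoldlAddMem tw [c] (fun x hx => by simp [htwc x hx])]
      exact pvFoldlAddCons c dw [] hcdw
    have hcount_c : (c :: t).count c = tw.length + 1 := by
      rw [← hsplit]
      have h1 : tw.count c = tw.length := List.count_eq_length.mpr (fun b hb => (htwc b hb).symm)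
      have h2 : dw.count c = 0 := List.count_eq_zero.mpr hcdw
      simp [List.count_append, h1, h2]
    have hcount_k : ∀ k ∈ dw, (c :: t).count k = dw.count k := by
      intro k hk
      have hkc : k ≠ c := fun he => hcdw (he ▸ hk)
      rw [← hsplit]
      have h1 : tw.count k = 0 := List.count_eq_zero.mpr (fun hkm => hkc (htwc k hkm))
      have h2 : ¬c = k := fun he => hkc he.symm
      simp [List.count_append, h1, h2]
    rw [pvRuns, hofl, List.map_cons, hcount_c]
    have hmap : (PySem.Set.ofList dw).map (fun k => ((c :: t).count k : Int))
        = (PySem.Set.ofList dw).map (fun k => (dw.count k : Int)) := by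
      apply List.map_congr_left
      intro k hk
      rw [hcount_k k ((PySem.Set.mem_ofList dw k).mp hk)]
    rw [hmap]
    exact List.Perm.cons _ (ih hdwp)

-- reverse-sorted (id key) lists of permutable multisets are equal
lemma pvSortedRevEq {xs ys : List Int} (h : xs.Perm ys) :
    PySem.List.sorted xs (fun x => x) true = PySem.List.sorted ys (fun x => x) true := by
  apply PySem.List.eq_of_perm_of_pairwise_le_of_injective (key := fun x : Int => -x) neg_injective
  · exact ((PySem.List.sorted_perm xs _ true).trans h).trans (PySem.List.sorted_perm ys _ true).symm
  · exact (PySem.List.sorted_pairwise_rev xs _).imp (by intro a b h; simpa using h)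
  · exact (PySem.List.sorted_pairwise_rev ys _).imp (by intro a b h; simpa using h)

-- the values A sorts: per-distinct-non-'J'-card counts (both erase branches)
lemma pvAValues (xs : List Char) :
    (if (PySem.Dict.counter xs).contains 'J' then (PySem.Dict.counter xs).erase 'J' else PySem.Dict.counter xs).values
    = (PySem.Set.ofList (xs.filter (fun c => !(c == 'J')))).map (fun k => ((xs.filter (fun c => !(c == 'J'))).count k : Int)) := by
  have hcnt : ∀ k, (k == 'J') = false → xs.count k = (xs.filter (fun c => !(c == 'J'))).count k := by
    intro k hk
    exact (List.count_filter (by simpa using hk)).symm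
  by_cases h : (PySem.Dict.counter xs).contains 'J' = true
  · simp only [h, if_true]
    show ((PySem.Dict.counter xs).items.filter (fun p => !(p.1 == 'J'))).map (·.2) = _
    rw [PySem.Dict.items_counter, List.filter_map, List.map_map]
    rw [← pvOfListFilter]
    apply List.map_congr_left
    intro k hk
    have hk2 : (!(k == 'J')) = true := (List.mem_filter.mp hk).2
    have : (k == 'J') = false := by simpa using hk2
    simp [hcnt k this]
  · simp only [Bool.not_eq_true] at h
    simp only [h, Bool.false_eq_true, if_false]
    have hJ : 'J' ∉ xs := by
      rw [PySem.Dict.contains_counter] at h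
      simpa using h
    have hrest : xs.filter (fun c => !(c == 'J')) = xs :=
      List.filter_eq_self.mpr (fun a ha => by simpa using fun he : a = 'J' => hJ (he ▸ ha))
    rw [hrest]
    show (PySem.Dict.counter xs).items.map (·.2) = _
    rw [PySem.Dict.items_counter, List.map_map]
    rfl

lemma pvLenFilter (xs : List Char) :
    (xs.filter (fun c => !(c == 'J'))).length + xs.count 'J' = xs.length := by
  rw [List.count_eq_countP, ← List.countP_eq_length_filter]
  rw [List.length_eq_countP_add_countP (p := fun c => !(c == 'J')) (l := xs)]
  congr 1
  exact List.countP_congr (by intro x _; simp)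

-- the joker count both programs return
lemma pvJs (xs : List Char) :
    (if (PySem.Dict.counter xs).contains 'J' then (PySem.Dict.counter xs).getD 'J' 0 else 0)
    = (xs.length : Int) - ((xs.filter (fun c => !(c == 'J'))).length : Int) := by
  have hlen := pvLenFilter xs
  by_cases h : (PySem.Dict.counter xs).contains 'J' = true
  · simp only [h, if_true, PySem.Dict.getD_counter]
    omega
  · simp only [Bool.not_eq_true] at h
    have hJ : xs.count 'J' = 0 := by
      rw [PySem.Dict.contains_counter] at h
      exact List.count_eq_zero.mpr (by simpa using h)
    simp only [h, Bool.false_eq_true, if_false]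
    omega

-- ===== VERDICT (by name: the statement is the Claim_ definition above) =====
theorem countRepeatsJ_spec : Claim_equal_countRepeatsJ := by
  intro cards _
  unfold Spec_countRepeatsJ countRepeatsJ countRepeatsJ_alt
  have hfold : cards.toList.foldl (fun d c =>
      let d' := if d.contains c then d else d.insert c (0 : Int)
      d'.insert c (d'.getD c 0 + 1)) PySem.Dict.empty = PySem.Dict.counter cards.toList := by
    rw [PySem.List.foldl_congr_mem _ _ _ _ (fun acc x _ => pvStepA acc x)]
    exact PySem.Dict.foldl_insert_getD_add_one_eq_counter _
  simp only [hfold]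
  congr 1
  · -- sorted lists agree
    rw [pvAValues]
    apply pvSortedRevEq
    set rest0 := cards.toList.filter (fun c => !(c == 'J')) with hr
    set s := PySem.List.sorted rest0 (fun c => c) false with hs
    have h1 := pvRunsPerm s (by rw [hs]; exact PySem.List.sorted_pairwise rest0 (fun c => c))
    have h2 : (PySem.Set.ofList s).map (fun k => (s.count k : Int))
        = (PySem.Set.ofList s).map (fun k => (rest0.count k : Int)) := by
      apply List.map_congr_left
      intro k _
      rw [(PySem.List.sorted_perm rest0 (fun c => c) false).count_eq]
    rw [h2] at h1
    have h3 : (PySem.Set.ofList s).Perm (PySem.Set.ofList rest0) := by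
      rw [List.perm_ext_iff_of_nodup (PySem.Set.nodup_ofList _) (PySem.Set.nodup_ofList _)]
      intro a
      rw [PySem.Set.mem_ofList, PySem.Set.mem_ofList, PySem.List.mem_sorted]
    exact ((h3.map _).symm.trans h1.symm)
  · rw [PySem.List.length_sorted, pvJs]
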